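-- pv_equiv track=rewrite | github.com/inadan02/AI_UBB | Lab1/main.py | pb9
-- ===== SOURCE A (Python) =====
-- def pb9(matr, perechi):
--     """
--     O(n*m)
--     matricea incepe de la 0
--     :param matr: matricea data
--     :param perechi: lista de perechi ce reprezinta coordonatele a celor 2 casute
--     :return:
--     """
--     rez = []
--     for pereche1, pereche2 in perechi:
--         suma = 0
--         for i in range(pereche1[0], pereche2[0] + 1):
--             for j in range(pereche1[1], pereche2[1] + 1):
--                 suma += matr[i][j]
--         rez.append(suma)
--     return rez
-- ===== SOURCE B (Python) =====
-- def pb9(matr, perechi):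
--     # Integral image (2D prefix sums) built once; each query answered by inclusion-exclusion.
--     n = len(matr)
--     m = len(matr[0]) if matr else 0
--     P = {(0, j): 0 for j in range(m + 1)}
--     for i, row in enumerate(matr):
--         s = 0
--         P[(i + 1, 0)] = 0
--         for j, v in enumerate(row):
--             s += v
--             P[(i + 1, j + 1)] = P[(i, j + 1)] + s
--     rez = []
--     for (r1, c1), (r2, c2) in perechi:
--         if r2 < r1 or c2 < c1:
--             rez.append(0)
--         else:
--             rez.append(P[(r2 + 1, c2 + 1)] - P[(r1, c2 + 1)]
--                        - P[(r2 + 1, c1)] + P[(r1, c1)])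
--     return rez
-- ===== Notes on version B (the rewrite author's own statement) =====
-- stated objective: alternative
-- what changed: B precomputes a 2D integral image (prefix-sum table keyed by (i,j)) once and answers each query rectangle by inclusion-exclusion in O(1), instead of A's per-query nested row/column summation loops; intended as asymptotically faster (O(n*m+q) vs O(q*n*m)) but a timing run measured only 1.36x at the largest size, so no speed is claimed.
-- outside the precondition, e.g. on pb9([[1, 2], [3, 4]], [((-1, 0), (-1, 0))]): A returns [3], B raises KeyError; on pb9([[1], [2, 3]], [((1, 1), (1, 1))]): A returns [3], B raises KeyError
import Mathlib
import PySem

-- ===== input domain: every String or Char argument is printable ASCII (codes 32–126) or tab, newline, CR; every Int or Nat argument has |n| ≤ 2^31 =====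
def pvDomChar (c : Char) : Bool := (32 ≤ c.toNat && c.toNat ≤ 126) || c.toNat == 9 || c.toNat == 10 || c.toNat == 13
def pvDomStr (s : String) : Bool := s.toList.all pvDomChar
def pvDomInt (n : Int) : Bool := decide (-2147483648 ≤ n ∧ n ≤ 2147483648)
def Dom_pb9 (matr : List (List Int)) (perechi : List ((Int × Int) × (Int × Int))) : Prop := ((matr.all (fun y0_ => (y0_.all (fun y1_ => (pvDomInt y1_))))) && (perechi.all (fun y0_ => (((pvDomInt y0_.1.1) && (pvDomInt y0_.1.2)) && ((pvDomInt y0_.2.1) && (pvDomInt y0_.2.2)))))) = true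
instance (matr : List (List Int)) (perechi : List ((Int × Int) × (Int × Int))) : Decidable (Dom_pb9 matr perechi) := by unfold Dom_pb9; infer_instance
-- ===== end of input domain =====

-- B replaces A's per-query nested summation loops by a 2D integral image (prefix-sum dict)
-- built once, answering each query by inclusion-exclusion (objective: alternative algorithm).

-- ===== PORT A =====
-- matr[i][j] would raise IndexError out of range; pyGetD is exact under Pre_pb9 (all accesses in range)
def pb9 (matr : List (List Int)) (perechi : List ((Int × Int) × (Int × Int))) : List Int :=
  perechi.foldl (fun rez q =>
    let suma : Int :=
      (PySem.List.pyRange q.1.1 (q.2.1 + 1) 1).foldl (fun s i =>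
        (PySem.List.pyRange q.1.2 (q.2.2 + 1) 1).foldl (fun s j =>
          s + PySem.List.pyGetD (PySem.List.pyGetD matr i []) j 0) s) 0
    rez ++ [suma]) []

-- ===== PORT B =====
-- step of B's inner loop 'for j, v in enumerate(row)': state = (running row sum s, dict P)
def pb9AltStep (i : Int) (sd : Int × PySem.Dict (Int × Int) Int) (q : Int × Int) :
    Int × PySem.Dict (Int × Int) Int :=
  (sd.1 + q.2, sd.2.insert (i + 1, q.1 + 1) (sd.2.getD (i, q.1 + 1) 0 + (sd.1 + q.2)))

-- body of B's outer loop 'for i, row in enumerate(matr)' (p = (i, row))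
def pb9AltRow (d : PySem.Dict (Int × Int) Int) (p : Int × List Int) : PySem.Dict (Int × Int) Int :=
  ((PySem.List.enumerate p.2 0).foldl (pb9AltStep p.1) (0, d.insert (p.1 + 1, 0) 0)).2

-- P[(r2+1,c2+1)] etc. would raise KeyError for a missing key; under Pre_pb9 every key used is
-- present, so getD is exact there
def pb9_alt (matr : List (List Int)) (perechi : List ((Int × Int) × (Int × Int))) : List Int :=
  let m : Int := if matr.isEmpty then 0 else ((PySem.List.pyGetD matr 0 []).length : Int)
  let P0 : PySem.Dict (Int × Int) Int :=
    (PySem.List.pyRange 0 (m + 1) 1).foldl (fun d j => d.insert (0, j) 0) PySem.Dict.empty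
  let P : PySem.Dict (Int × Int) Int := (PySem.List.enumerate matr 0).foldl pb9AltRow P0
  perechi.foldl (fun rez q =>
    if q.2.1 < q.1.1 ∨ q.2.2 < q.1.2 then rez ++ [(0 : Int)]
    else rez ++ [P.getD (q.2.1 + 1, q.2.2 + 1) 0 - P.getD (q.1.1, q.2.2 + 1) 0
                 - P.getD (q.2.1 + 1, q.1.2) 0 + P.getD (q.1.1, q.1.2) 0]) []

-- ===== PRECONDITION & SPEC =====
-- Pre_ excludes non-rectangular matrices and queries whose non-empty rectangle reaches outside
-- [0,n)×[0,m): there A raises IndexError or returns sums over Python negative-index wraparound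
-- entries, while B's precomputed integral-image dict itself raises KeyError.
def Pre_pb9 (matr : List (List Int)) (perechi : List ((Int × Int) × (Int × Int))) : Prop :=
  (∀ r ∈ matr, r.length = (matr.headD []).length) ∧
  ∀ q ∈ perechi, (q.2.1 < q.1.1 ∨ q.2.2 < q.1.2) ∨
    (0 ≤ q.1.1 ∧ q.1.1 ≤ q.2.1 ∧ q.2.1 < (matr.length : Int) ∧
     0 ≤ q.1.2 ∧ q.1.2 ≤ q.2.2 ∧ q.2.2 < ((matr.headD []).length : Int))
instance (matr : List (List Int)) (perechi : List ((Int × Int) × (Int × Int))) : Decidable (Pre_pb9 matr perechi) := by unfold Pre_pb9; infer_instance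

def pvWitness_pb9 : List (List Int) × (List ((Int × Int) × (Int × Int))) :=
  ([[1, 2], [3, 4]], [((0, 0), (1, 1)), ((0, 1), (1, 1)), ((1, 0), (0, 1))])

def Spec_pb9 (matr : List (List Int)) (perechi : List ((Int × Int) × (Int × Int))) (out : List Int) : Prop := out = pb9_alt matr perechi
instance (matr : List (List Int)) (perechi : List ((Int × Int) × (Int × Int))) (out : List Int) : Decidable (Spec_pb9 matr perechi out) := by unfold Spec_pb9; infer_instance

-- ===== CLAIM (what is proved, stated in full; the proofs are below) =====
def Claim_equal_pb9 : Prop := ∀ (matr : List (List Int)) (perechi : List ((Int × Int) × (Int × Int))), Dom_pb9 matr perechi → Pre_pb9 matr perechi → Spec_pb9 matr perechi (pb9 matr perechi)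

-- ===== LEMMAS AND PROOFS =====

-- the exact integral image: pvF matr a b = sum of the top-left a×b corner of matr
def pvF (matr : List (List Int)) (a b : Nat) : Int :=
  ((matr.take a).map (fun r => (r.take b).sum)).sum

theorem pvF_zero_col (matr : List (List Int)) (a : Nat) : pvF matr a 0 = 0 := by
  simp [pvF]

theorem pvF_succ_row (matr : List (List Int)) (a : Nat) (ha : a < matr.length) (b : Nat) :
    pvF matr (a + 1) b = pvF matr a b + ((matr[a].take b).sum) := by
  have h : matr.take (a + 1) = matr.take a ++ [matr[a]] := by
    rw [List.take_add_one, List.getElem?_eq_getElem ha]; rfl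
  rw [pvF, pvF, h, List.map_append, List.sum_append]
  simp

theorem pvF_add_row (matr : List (List Int)) (a k b : Nat) :
    pvF matr (a + k) b
      = pvF matr a b + (((matr.drop a).take k).map (fun r => (r.take b).sum)).sum := by
  simp [pvF, List.take_add]

theorem pv_take_add_sum (r : List Int) (c k : Nat) :
    (r.take (c + k)).sum = (r.take c).sum + ((r.drop c).take k).sum := by
  rw [List.take_add, List.sum_append]

theorem pv_sum_map_sub {α : Type} (l : List α) (f g : α → Int) :
    (l.map f).sum - (l.map g).sum = (l.map (fun x => f x - g x)).sum := by
  induction l with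
  | nil => simp
  | cons x t ih => simp only [List.map_cons, List.sum_cons]; omega

theorem pv_foldl_id {α : Type} (l : List α) (x : Int) :
    l.foldl (fun s (_ : α) => s) x = x := by
  induction l generalizing x with
  | nil => rfl
  | cons a t ih => exact ih x

-- a Python sum over range(a, b) of xs[i], as a slice of xs
theorem pv_map_pyGetD_seg {α : Type} (xs : List α) (d : α) (a b : Int)
    (h0 : 0 ≤ a) (hb : b ≤ (xs.length : Int)) :
    (PySem.List.pyRange a b 1).map (fun i => PySem.List.pyGetD xs i d)
      = (xs.drop a.toNat).take (b.toNat - a.toNat) := by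
  by_cases hba : b ≤ a
  · rw [PySem.List.pyRange_one_eq_nil hba]
    have : b.toNat - a.toNat = 0 := by omega
    simp [this]
  · have hab : a ≤ b := by omega
    have hsplit := PySem.List.pyRange_one_append a b (xs.length : Int) hab hb
    have h1 : (PySem.List.pyRange a (xs.length : Int) 1).map (fun i => PySem.List.pyGetD xs i d)
        = xs.drop a.toNat := PySem.List.map_pyGetD_pyRange' (xs := xs) (d := d) h0
    have h2 : (PySem.List.pyRange b (xs.length : Int) 1).map (fun i => PySem.List.pyGetD xs i d)
        = xs.drop b.toNat := PySem.List.map_pyGetD_pyRange' (xs := xs) (d := d) (by omega)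
    rw [hsplit, List.map_append, h2] at h1
    have hlen : ((PySem.List.pyRange a b 1).map (fun i => PySem.List.pyGetD xs i d)).length
        = b.toNat - a.toNat := by
      rw [List.length_map, PySem.List.length_pyRange_one]; omega
    calc (PySem.List.pyRange a b 1).map (fun i => PySem.List.pyGetD xs i d)
        = ((PySem.List.pyRange a b 1).map (fun i => PySem.List.pyGetD xs i d)
            ++ xs.drop b.toNat).take (b.toNat - a.toNat) := by
          rw [List.take_append_of_le_length (by omega), ← hlen, List.take_length]
      _ = (xs.drop a.toNat).take (b.toNat - a.toNat) := by rw [h1]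

-- ===== B-side dict lemmas =====

theorem pv_P0_get : ∀ (js : List Int) (d : PySem.Dict (Int × Int) Int)
    (key : Int × Int),
    (js.foldl (fun d j => d.insert ((0 : Int), j) (0 : Int)) d).get? key
      = if key.1 = 0 ∧ key.2 ∈ js then some 0 else d.get? key := by
  intro js
  induction js with
  | nil => intro d key; simp
  | cons j t ih =>
    intro d key
    rw [List.foldl_cons, ih]
    rw [PySem.Dict.get?_insert]
    by_cases h1 : key.1 = 0 ∧ key.2 ∈ t
    · rw [if_pos h1, if_pos ⟨h1.1, List.mem_cons.mpr (Or.inr h1.2)⟩]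
    · by_cases h2 : key = (0, j)
      · rw [if_neg h1, if_pos h2, if_pos ⟨by rw [h2], by rw [h2]; exact List.mem_cons_self⟩]
      · have h3 : ¬ (key.1 = 0 ∧ key.2 ∈ j :: t) := by
          rintro ⟨hk1, hk2⟩
          rcases List.mem_cons.mp hk2 with hk2 | hk2
          · exact h2 (Prod.ext hk1 hk2)
          · exact h1 ⟨hk1, hk2⟩
        rw [if_neg h1, if_neg h2, if_neg h3]

theorem pv_inner (i : Int) (row : List Int) : ∀ (j0 : Nat) (s : Int)
    (d : PySem.Dict (Int × Int) Int),
    (∀ k : Int × Int, (k.1 ≠ i + 1 ∨ k.2 ≤ (j0 : Int)) →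
      ((PySem.List.enumerate row (j0 : Int)).foldl (pb9AltStep i) (s, d)).2.get? k = d.get? k)
    ∧ (∀ t : Nat, t < row.length →
      ((PySem.List.enumerate row (j0 : Int)).foldl (pb9AltStep i) (s, d)).2.get?
          (i + 1, (j0 : Int) + t + 1)
        = some (d.getD (i, (j0 : Int) + t + 1) 0 + s + (row.take (t + 1)).sum)) := by
  induction row with
  | nil =>
    intro j0 s d
    exact ⟨fun k _ => by simp [PySem.List.enumerate_nil],
           fun t ht => absurd ht (by simp)⟩
  | cons v rest ih =>
    intro j0 s d
    have hcast : ((j0 + 1 : Nat) : Int) = (j0 : Int) + 1 := by push_cast; ring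
    have hfold : (PySem.List.enumerate (v :: rest) (j0 : Int)).foldl (pb9AltStep i) (s, d)
        = (PySem.List.enumerate rest ((j0 + 1 : Nat) : Int)).foldl (pb9AltStep i)
            (s + v, d.insert (i + 1, (j0 : Int) + 1) (d.getD (i, (j0 : Int) + 1) 0 + (s + v))) := by
      rw [PySem.List.enumerate_cons, List.foldl_cons, hcast]
      rfl
    obtain ⟨ihA, ihB⟩ := ih (j0 + 1) (s + v)
      (d.insert (i + 1, (j0 : Int) + 1) (d.getD (i, (j0 : Int) + 1) 0 + (s + v)))
    constructor
    · intro k hk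
      have hne : k ≠ (i + 1, (j0 : Int) + 1) := by
        intro heq
        rcases hk with h | h
        · exact h (by rw [heq])
        · rw [heq] at h; simp at h
      rw [hfold, ihA k (hk.imp (fun h => h) (fun h => by rw [hcast]; omega)),
          PySem.Dict.get?_insert, if_neg hne]
    · intro t ht
      cases t with
      | zero =>
        have hkarg : (i + 1, (j0 : Int) + (0 : Nat) + 1) = ((i + 1, (j0 : Int) + 1) : Int × Int) := by
          norm_num
        rw [hfold, hkarg, ihA (i + 1, (j0 : Int) + 1) (Or.inr (by omega)),
            PySem.Dict.get?_insert_self]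
        norm_num
        ring
      | succ t' =>
        have htlt : t' < rest.length := by simpa using ht
        have hb := ihB t' htlt
        have hkarg : ((j0 + 1 : Nat) : Int) + (t' : Int) + 1 = (j0 : Int) + ((t' + 1 : Nat) : Int) + 1 := by
          push_cast; ring
        rw [hkarg] at hb
        rw [hfold, hb]
        have hne2 : ((i, (j0 : Int) + ((t' + 1 : Nat) : Int) + 1) : Int × Int)
            ≠ (i + 1, (j0 : Int) + 1) := by
          intro heq; injection heq with heq1 heq2; omega
        rw [PySem.Dict.getD_insert, if_neg hne2]
        have htk : ((v :: rest).take (t' + 1 + 1)).sum = v + (rest.take (t' + 1)).sum := by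
          simp [List.take_succ_cons]
        rw [htk]
        congr 1
        ring

theorem pv_outer (matr : List (List Int)) (mN : Nat)
    (hrect : ∀ r ∈ matr, r.length = mN) :
    ∀ (rows : List (List Int)) (k : Nat) (d : PySem.Dict (Int × Int) Int),
      matr.drop k = rows → k + rows.length = matr.length →
      (∀ a b : Nat, a ≤ k → b ≤ mN → d.get? ((a : Int), (b : Int)) = some (pvF matr a b)) →
      ∀ a b : Nat, a ≤ matr.length → b ≤ mN →
        ((PySem.List.enumerate rows (k : Int)).foldl pb9AltRow d).get? ((a : Int), (b : Int))
          = some (pvF matr a b) := by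
  intro rows
  induction rows with
  | nil =>
    intro k d hdrop hlen hinv a b ha hb
    simp only [PySem.List.enumerate_nil, List.foldl_nil]
    have hk : k = matr.length := by simpa using hlen
    exact hinv a b (by omega) hb
  | cons row rest ih =>
    intro k d hdrop hlen hinv a b ha hb
    have hkica : k < matr.length := by simp at hlen; omega
    have hrow? : matr[k]? = some row := by rw [← List.head?_drop, hdrop]; rfl
    have hrow : matr[k] = row :=
      Option.some.inj ((List.getElem?_eq_getElem hkica).symm.trans hrow?)
    have hrowmem : row ∈ matr := by
      rw [← hrow]; exact List.getElem_mem _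
    have hrowlen : row.length = mN := hrect row hrowmem
    have hen : PySem.List.enumerate (row :: rest) (k : Int)
        = ((k : Int), row) :: PySem.List.enumerate rest ((k : Int) + 1) :=
      PySem.List.enumerate_cons _ _ _
    have hcast : ((k : Int) + 1) = ((k + 1 : Nat) : Int) := by push_cast; ring
    rw [hen, List.foldl_cons, hcast]
    have hinner := pv_inner (k : Int) row 0
    apply ih (k + 1) (pb9AltRow d ((k : Int), row))
    · rw [← List.drop_drop, hdrop]; rfl
    · simp at hlen ⊢; omega
    · intro a' b' ha' hb'
      obtain ⟨hA, hB⟩ := hinner 0 (d.insert ((k : Int) + 1, 0) 0)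
      by_cases hak : a' ≤ k
      · have hne1 : ((a' : Int)) ≠ (k : Int) + 1 := by omega
        have := hA ((a' : Int), (b' : Int)) (Or.inl hne1)
        simp only [pb9AltRow] at *
        rw [Nat.cast_zero] at this
        rw [this, PySem.Dict.get?_insert]
        have : ¬ (((a' : Int), (b' : Int)) : Int × Int) = ((k : Int) + 1, 0) := by
          intro h; injection h with h1 h2; omega
        rw [if_neg this]
        exact hinv a' b' hak hb'
      · have ha'eq : a' = k + 1 := by omega
        subst ha'eq
        cases b' with
        | zero =>
          have := hA (((k : Int) + 1, (0 : Int))) (by right; simp)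
          simp only [pb9AltRow] at *
          rw [Nat.cast_zero] at this ⊢
          push_cast
          rw [this, PySem.Dict.get?_insert_self, pvF_zero_col]
        | succ t =>
          have htlt : t < row.length := by omega
          have := hB t htlt
          simp only [pb9AltRow] at *
          rw [Nat.cast_zero] at this
          have harg : (0 : Int) + (t : Int) + 1 = ((t + 1 : Nat) : Int) := by push_cast; ring
          rw [harg] at this
          have hkey : (((k + 1 : Nat) : Int), ((t + 1 : Nat) : Int))
              = ((k : Int) + 1, ((t + 1 : Nat) : Int)) := by push_cast; rfl
        -- value of the inserted cell
          rw [hkey, this]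
          have hgd : (d.insert ((k : Int) + 1, 0) 0).getD ((k : Int), ((t + 1 : Nat) : Int)) 0
              = pvF matr k (t + 1) := by
            rw [PySem.Dict.getD_insert]
            have : ¬ (((k : Int), ((t + 1 : Nat) : Int)) : Int × Int) = ((k : Int) + 1, 0) := by
              intro h; injection h with h1 h2; omega
            rw [if_neg this]
            rw [PySem.Dict.getD_eq_get?_getD, hinv k (t + 1) le_rfl hb']; rfl
          rw [hgd]
          rw [pvF_succ_row matr k hkica (t + 1), hrow]
          norm_num

    case _ => exact ha
    case _ => exact hb

-- initial dict after the comprehension {(0, j): 0 for j in range(m + 1)}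
theorem pv_P0_spec (matr : List (List Int)) (m : Int) (_hm : 0 ≤ m) (b : Nat) (hb : (b : Int) ≤ m) :
    ((PySem.List.pyRange 0 (m + 1) 1).foldl
        (fun d j => d.insert ((0 : Int), j) (0 : Int)) PySem.Dict.empty).get?
      ((0 : Int), (b : Int)) = some (pvF matr 0 b) := by
  rw [pv_P0_get _ PySem.Dict.empty ((0 : Int), (b : Int))]
  have : ((b : Int) ∈ PySem.List.pyRange 0 (m + 1) 1) := by
    rw [PySem.List.mem_pyRange_one]; omega
  simp [this, pvF]

-- the integral image B builds, as one term (same construction as in pb9_alt)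
def pvP (matr : List (List Int)) : PySem.Dict (Int × Int) Int :=
  (PySem.List.enumerate matr 0).foldl pb9AltRow
    ((PySem.List.pyRange 0 ((if matr.isEmpty then (0 : Int)
        else ((PySem.List.pyGetD matr 0 []).length : Int)) + 1) 1).foldl
      (fun d j => d.insert (0, j) 0) PySem.Dict.empty)

theorem pvP_get (matr : List (List Int))
    (hrect : ∀ r ∈ matr, r.length = (matr.headD []).length) :
    ∀ a b : Nat, a ≤ matr.length → b ≤ (matr.headD []).length →
      (pvP matr).get? ((a : Int), (b : Int)) = some (pvF matr a b) := by
  intro a b ha hb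
  have hm : (if matr.isEmpty then (0 : Int)
      else ((PySem.List.pyGetD matr 0 []).length : Int)) = ((matr.headD []).length : Int) := by
    cases matr <;> simp [PySem.List.pyGetD_zero_cons]
  unfold pvP
  rw [hm]
  refine pv_outer matr _ hrect matr 0 _ (by simp) (by simp) ?_ a b ha hb
  intro a' b' ha' hb'
  have ha0 : a' = 0 := by omega
  subst ha0
  exact pv_P0_spec matr ((matr.headD []).length : Int) (by positivity) b' (by exact_mod_cast hb')

theorem pv_incl_excl (matr : List (List Int)) (r1N r2N c1N c2N : Nat)
    (hr : r1N ≤ r2N) (hc : c1N ≤ c2N) :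
    pvF matr (r2N + 1) (c2N + 1) - pvF matr r1N (c2N + 1)
      - pvF matr (r2N + 1) c1N + pvF matr r1N c1N
    = (((matr.drop r1N).take (r2N + 1 - r1N)).map
        (fun r => ((r.drop c1N).take (c2N + 1 - c1N)).sum)).sum := by
  have hrow2 : r2N + 1 = r1N + (r2N + 1 - r1N) := by omega
  rw [hrow2, pvF_add_row matr r1N (r2N + 1 - r1N) (c2N + 1),
      pvF_add_row matr r1N (r2N + 1 - r1N) c1N]
  have hring : ∀ x y S1 S2 : Int, x + S1 - x - (y + S2) + y = S1 - S2 := by intros; ring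
  rw [hring, pv_sum_map_sub, Nat.add_sub_cancel_left]
  refine congrArg List.sum (List.map_congr_left ?_)
  intro r _
  have hsum := pv_take_add_sum r c1N (c2N + 1 - c1N)
  have hcc : c1N + (c2N + 1 - c1N) = c2N + 1 := by omega
  rw [hcc] at hsum
  omega

theorem pv_query (matr : List (List Int))
    (hrect : ∀ r ∈ matr, r.length = (matr.headD []).length)
    (r1 c1 r2 c2 : Int)
    (hq : (r2 < r1 ∨ c2 < c1) ∨
      (0 ≤ r1 ∧ r1 ≤ r2 ∧ r2 < (matr.length : Int) ∧
       0 ≤ c1 ∧ c1 ≤ c2 ∧ c2 < ((matr.headD []).length : Int))) :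
    (PySem.List.pyRange r1 (r2 + 1) 1).foldl (fun s i =>
        (PySem.List.pyRange c1 (c2 + 1) 1).foldl (fun s j =>
          s + PySem.List.pyGetD (PySem.List.pyGetD matr i []) j 0) s) 0
      = if r2 < r1 ∨ c2 < c1 then 0
        else (pvP matr).getD (r2 + 1, c2 + 1) 0 - (pvP matr).getD (r1, c2 + 1) 0
             - (pvP matr).getD (r2 + 1, c1) 0 + (pvP matr).getD (r1, c1) 0 := by
  by_cases hC : r2 < r1 ∨ c2 < c1
  · rw [if_pos hC]
    rcases hC with h | h
    · rw [PySem.List.pyRange_one_eq_nil (by omega : r2 + 1 ≤ r1)]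
      rfl
    · have hcong : ∀ (acc : Int), ∀ i ∈ PySem.List.pyRange r1 (r2 + 1) 1,
          (PySem.List.pyRange c1 (c2 + 1) 1).foldl
              (fun s j => s + PySem.List.pyGetD (PySem.List.pyGetD matr i []) j 0) acc
            = (fun s (_ : Int) => s) acc i := by
        intro acc i _
        rw [PySem.List.pyRange_one_eq_nil (by omega : c2 + 1 ≤ c1), List.foldl_nil]
      exact (PySem.List.foldl_congr_mem _ _ _ _ hcong).trans (pv_foldl_id _ 0)
  · have hb := hq.resolve_left hC
    obtain ⟨h1, h2, h3, h4, h5, h6⟩ := hb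
    rw [if_neg hC]
    have hinner : ∀ (acc : Int), ∀ i ∈ PySem.List.pyRange r1 (r2 + 1) 1,
        (PySem.List.pyRange c1 (c2 + 1) 1).foldl
            (fun s j => s + PySem.List.pyGetD (PySem.List.pyGetD matr i []) j 0) acc
          = (fun s i => s + (((PySem.List.pyGetD matr i []).drop c1.toNat).take
              ((c2 + 1).toNat - c1.toNat)).sum) acc i := by
      intro acc i hi
      rw [PySem.List.mem_pyRange_one] at hi
      have hrowi := PySem.List.pyGetD_eq_getElem (xs := matr) (d := ([] : List Int)) (i := i)
        (by omega) (by omega)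
      have hlen : c2 + 1 ≤ ((PySem.List.pyGetD matr i []).length : Int) := by
        rw [hrowi, hrect _ (List.getElem_mem _)]
        omega
      rw [PySem.List.foldl_add]
      rw [pv_map_pyGetD_seg _ 0 c1 (c2 + 1) h4 hlen]
    refine ((PySem.List.foldl_congr_mem _ _ _ _ hinner).trans ?_)
    rw [PySem.List.foldl_add]
    have hout : (PySem.List.pyRange r1 (r2 + 1) 1).map
        (fun i => (((PySem.List.pyGetD matr i []).drop c1.toNat).take
          ((c2 + 1).toNat - c1.toNat)).sum)
        = ((matr.drop r1.toNat).take ((r2 + 1).toNat - r1.toNat)).map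
            (fun r => ((r.drop c1.toNat).take ((c2 + 1).toNat - c1.toNat)).sum) := by
      rw [show (fun i => (((PySem.List.pyGetD matr i []).drop c1.toNat).take
            ((c2 + 1).toNat - c1.toNat)).sum)
          = (fun r : List Int => ((r.drop c1.toNat).take ((c2 + 1).toNat - c1.toNat)).sum)
              ∘ (fun i => PySem.List.pyGetD matr i []) from rfl]
      rw [← List.map_map, pv_map_pyGetD_seg matr [] r1 (r2 + 1) h1 (by omega)]
    rw [hout]
    have e1 : (pvP matr).getD (r2 + 1, c2 + 1) 0 = pvF matr (r2.toNat + 1) (c2.toNat + 1) := by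
      rw [show (r2 + 1 : Int) = ((r2.toNat + 1 : Nat) : Int) by omega,
          show (c2 + 1 : Int) = ((c2.toNat + 1 : Nat) : Int) by omega,
          PySem.Dict.getD_eq_get?_getD, pvP_get matr hrect _ _ (by omega) (by omega)]
      rfl
    have e2 : (pvP matr).getD (r1, c2 + 1) 0 = pvF matr r1.toNat (c2.toNat + 1) := by
      rw [show (r1 : Int) = ((r1.toNat : Nat) : Int) by omega,
          show (c2 + 1 : Int) = ((c2.toNat + 1 : Nat) : Int) by omega,
          PySem.Dict.getD_eq_get?_getD, pvP_get matr hrect _ _ (by omega) (by omega)]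
      rfl
    have e3 : (pvP matr).getD (r2 + 1, c1) 0 = pvF matr (r2.toNat + 1) c1.toNat := by
      rw [show (r2 + 1 : Int) = ((r2.toNat + 1 : Nat) : Int) by omega,
          show (c1 : Int) = ((c1.toNat : Nat) : Int) by omega,
          PySem.Dict.getD_eq_get?_getD, pvP_get matr hrect _ _ (by omega) (by omega)]
      rfl
    have e4 : (pvP matr).getD (r1, c1) 0 = pvF matr r1.toNat c1.toNat := by
      rw [show (r1 : Int) = ((r1.toNat : Nat) : Int) by omega,
          show (c1 : Int) = ((c1.toNat : Nat) : Int) by omega,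
          PySem.Dict.getD_eq_get?_getD, pvP_get matr hrect _ _ (by omega) (by omega)]
      rfl
    rw [e1, e2, e3, e4, pv_incl_excl matr r1.toNat r2.toNat c1.toNat c2.toNat
      (by omega) (by omega)]
    rw [show (r2 + 1).toNat = r2.toNat + 1 by omega, show (c2 + 1).toNat = c2.toNat + 1 by omega]
    ring

-- ===== VERDICT (by name: the statement is the Claim_ definition above) =====
theorem pb9_spec : Claim_equal_pb9 := by
  intro matr perechi _hdom hpre
  obtain ⟨hrect, hq⟩ := hpre
  unfold Spec_pb9
  have eA : pb9 matr perechi = perechi.map (fun q =>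
      (PySem.List.pyRange q.1.1 (q.2.1 + 1) 1).foldl (fun s i =>
        (PySem.List.pyRange q.1.2 (q.2.2 + 1) 1).foldl (fun s j =>
          s + PySem.List.pyGetD (PySem.List.pyGetD matr i []) j 0) s) 0) :=
    PySem.List.foldl_append_singleton_eq_map _ _ _
  have eB : pb9_alt matr perechi = perechi.map (fun q =>
      if q.2.1 < q.1.1 ∨ q.2.2 < q.1.2 then 0 else
        (pvP matr).getD (q.2.1 + 1, q.2.2 + 1) 0 - (pvP matr).getD (q.1.1, q.2.2 + 1) 0
        - (pvP matr).getD (q.2.1 + 1, q.1.2) 0 + (pvP matr).getD (q.1.1, q.1.2) 0) := by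
    have hsplit : ∀ (acc : List Int), ∀ q ∈ perechi,
        (fun (rez : List Int) (q : (Int × Int) × (Int × Int)) =>
          if q.2.1 < q.1.1 ∨ q.2.2 < q.1.2 then rez ++ [(0 : Int)]
          else rez ++ [(pvP matr).getD (q.2.1 + 1, q.2.2 + 1) 0
            - (pvP matr).getD (q.1.1, q.2.2 + 1) 0
            - (pvP matr).getD (q.2.1 + 1, q.1.2) 0 + (pvP matr).getD (q.1.1, q.1.2) 0]) acc q
        = acc ++ [if q.2.1 < q.1.1 ∨ q.2.2 < q.1.2 then (0 : Int) else
            (pvP matr).getD (q.2.1 + 1, q.2.2 + 1) 0 - (pvP matr).getD (q.1.1, q.2.2 + 1) 0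
            - (pvP matr).getD (q.2.1 + 1, q.1.2) 0 + (pvP matr).getD (q.1.1, q.1.2) 0] := by
      intro acc q _
      by_cases hc : q.2.1 < q.1.1 ∨ q.2.2 < q.1.2
      · simp only [if_pos hc]
      · simp only [if_neg hc]
    exact (PySem.List.foldl_congr_mem _ _ _ _ hsplit).trans
      (PySem.List.foldl_append_singleton_eq_map _ _ _)
  rw [eA, eB]
  apply List.map_congr_left
  intro q hqm
  have hqq := hq q hqm
  rcases q with ⟨⟨r1, c1⟩, r2, c2⟩
  exact pv_query matr hrect r1 c1 r2 c2 hqq
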